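-- pv_equiv track=rewrite | github.com/patarzynak/Sarcagator | sarcagator.py | find_author_attack
-- ===== SOURCE A (Python) =====
-- def find_author_attack(tags):
-- 	attack = None
-- 	s_found = False
-- 	for t in tags:
-- 		word = t[0].lower()
-- 		if word =='\'re' or word == 'are':
-- 			s_found = True
-- 			pass
-- 		if s_found == True:
-- 			if t[1] == '.':
-- 				break
-- 			if t[1] == 'NN' or t[1] == 'NNS':
-- 				attack = t[0]
-- 				break
--
-- 	return attack
-- ===== SOURCE B (Python) =====
-- def find_author_attack(tags):
--     # Phase 1: position-based — index of the first trigger word, or None.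
--     trigger = next((k for k, t in enumerate(tags) if t[0].lower() in ("are", "'re")), None)
--     if trigger is None:
--         return None
--     tail = tags[trigger:]
--     # Phase 2: two independent index searches, then an arithmetic comparison:
--     # the noun counts only if it occurs strictly before any sentence-ending '.'.
--     noun = next((j for j, t in enumerate(tail) if t[1] in ("NN", "NNS")), len(tail))
--     dot = next((j for j, t in enumerate(tail) if t[1] == "."), len(tail))
--     if noun < dot and noun < len(tail):
--         return tail[noun][0]
--     return None
-- ===== Notes on version B (the rewrite author's own statement) =====
-- stated objective: alternative
-- what changed: Replaces A's single stateful flag loop with an index-arithmetic formulation: find the trigger index, slice the tail, find the first-noun and first-period indices independently, and return the noun only if its index is strictly smaller.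
import Mathlib
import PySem

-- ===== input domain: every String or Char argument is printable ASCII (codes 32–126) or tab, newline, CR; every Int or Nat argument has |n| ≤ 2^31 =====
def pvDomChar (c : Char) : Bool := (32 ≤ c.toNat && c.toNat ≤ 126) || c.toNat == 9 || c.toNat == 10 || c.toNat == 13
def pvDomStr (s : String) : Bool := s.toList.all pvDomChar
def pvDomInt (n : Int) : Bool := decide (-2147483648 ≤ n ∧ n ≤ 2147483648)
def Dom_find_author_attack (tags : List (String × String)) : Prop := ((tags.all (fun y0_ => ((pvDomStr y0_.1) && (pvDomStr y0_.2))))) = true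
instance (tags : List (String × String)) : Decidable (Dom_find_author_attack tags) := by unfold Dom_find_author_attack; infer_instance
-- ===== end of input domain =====

-- B replaces A's stateful flag loop by index arithmetic: locate the trigger index,
-- slice the tail, find the first-noun and first-period indices independently and
-- compare them; objective: alternative algorithm of the same cost.

-- ===== PORT A =====
-- literal transliteration of A's loop: state = (attack, s_found), break = return
def faaLoopA (attack : Option String) (s_found : Bool) : List (String × String) → Option String
  | [] => attack
  | t :: rest =>
    let word := PySem.Str.lower t.1
    let s_found := if word == "'re" || word == "are" then true else s_found
    if s_found = true then
      if t.2 == "." then attack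
      else if t.2 == "NN" || t.2 == "NNS" then some t.1
      else faaLoopA attack s_found rest
    else faaLoopA attack s_found rest

def find_author_attack (tags : List (String × String)) : Option String :=
  faaLoopA none false tags

-- ===== PORT B =====
def faaTrig (t : String × String) : Bool :=
  PySem.Str.lower t.1 == "are" || PySem.Str.lower t.1 == "'re"
def faaNoun (t : String × String) : Bool := t.2 == "NN" || t.2 == "NNS"
def faaDot (t : String × String) : Bool := t.2 == "."

-- Source B: trigger index via findIdx? (next with default None); tags[trigger:] is a
-- drop since trigger is a nonnegative in-range index; noun/dot via findIdx
-- (next with default len(tail)); tail[noun] is in range when the guard holds.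
def find_author_attack_alt (tags : List (String × String)) : Option String :=
  match tags.findIdx? faaTrig with
  | none => none
  | some i =>
    let tail := tags.drop i
    let noun := tail.findIdx faaNoun
    let dot := tail.findIdx faaDot
    if noun < dot ∧ noun < tail.length then (tail[noun]?).map Prod.fst else none

-- ===== PRECONDITION & SPEC =====
def Spec_find_author_attack (tags : List (String × String)) (out : Option String) : Prop := out = find_author_attack_alt tags
instance (tags : List (String × String)) (out : Option String) : Decidable (Spec_find_author_attack tags out) := by unfold Spec_find_author_attack; infer_instance

-- ===== CLAIM (what is proved, stated in full; the proofs are below) =====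
def Claim_equal_find_author_attack : Prop := ∀ (tags : List (String × String)), Dom_find_author_attack tags → Spec_find_author_attack tags (find_author_attack tags)

-- ===== LEMMAS AND PROOFS =====
-- B's phase 2 (index comparison on a list) as a function, for the induction
def faaScanB (tail : List (String × String)) : Option String :=
  let noun := tail.findIdx faaNoun
  let dot := tail.findIdx faaDot
  if noun < dot ∧ noun < tail.length then (tail[noun]?).map Prod.fst else none

-- once the flag is set, A's loop (with attack = none) equals B's index comparison
lemma faaLoopA_true (l : List (String × String)) : faaLoopA none true l = faaScanB l := by
  induction l with
  | nil => simp [faaLoopA, faaScanB]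
  | cons t rest ih =>
    by_cases hd : (t.2 == ".") = true
    · have ht : t.2 = "." := by simpa using hd
      have hn : faaNoun t = false := by simp [faaNoun, ht]
      simp [faaLoopA, faaScanB, List.findIdx_cons, hn, faaDot, ht]
    · by_cases hn : faaNoun t = true
      · have hn' : (t.2 == "NN" || t.2 == "NNS") = true := by simpa [faaNoun] using hn
        simp [faaLoopA, hn', faaScanB, List.findIdx_cons, hn, faaDot, hd]
      · have hn' : (t.2 == "NN" || t.2 == "NNS") = false := by
          simpa [faaNoun] using hn
        have hnf : faaNoun t = false := by simpa [faaNoun] using hn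
        have hd' : faaDot t = false := by simpa [faaDot] using hd
        have hstep : faaLoopA none true (t :: rest) = faaLoopA none true rest := by
          simp [faaLoopA, hd, hn']
        rw [hstep, ih]
        simp only [faaScanB, List.findIdx_cons, hnf, hd', cond_false, List.length_cons]
        by_cases h1 : rest.findIdx faaNoun < rest.findIdx faaDot ∧
                      rest.findIdx faaNoun < rest.length
        · have h2 : rest.findIdx faaNoun + 1 < rest.findIdx faaDot + 1 ∧
                    rest.findIdx faaNoun + 1 < rest.length + 1 := by omega
          simp [h1, h2]
        · have h2 : ¬ (rest.findIdx faaNoun + 1 < rest.findIdx faaDot + 1 ∧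
                    rest.findIdx faaNoun + 1 < rest.length + 1) := by omega
          rw [if_neg h1, if_neg h2]

lemma faa_main (l : List (String × String)) : find_author_attack l = find_author_attack_alt l := by
  induction l with
  | nil => rfl
  | cons t rest ih =>
    unfold find_author_attack find_author_attack_alt at *
    by_cases h : faaTrig t = true
    · have h' : (PySem.Str.lower t.1 == "'re" || PySem.Str.lower t.1 == "are") = true := by
        rcases Bool.or_eq_true_iff.mp h with h1 | h1 <;> simp [h1]
      rw [List.findIdx?_cons]
      simp only [h, if_true, List.drop_zero]
      show faaLoopA none false (t :: rest) = faaScanB (t :: rest)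
      rw [← faaLoopA_true]
      simp [faaLoopA, h']
    · have h' : (PySem.Str.lower t.1 == "'re" || PySem.Str.lower t.1 == "are") = false := by
        simp only [faaTrig, Bool.or_eq_true_iff] at h
        push Not at h
        simp [Bool.eq_false_iff] at h ⊢
        exact ⟨h.2, h.1⟩
      rw [List.findIdx?_cons]
      simp only [h]
      show faaLoopA none false (t :: rest) =
        match (rest.findIdx? faaTrig).map (· + 1) with
        | none => none
        | some i =>
          let tail := (t :: rest).drop i
          let noun := tail.findIdx faaNoun
          let dot := tail.findIdx faaDot
          if noun < dot ∧ noun < tail.length then (tail[noun]?).map Prod.fst else none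
      have step : faaLoopA none false (t :: rest) = faaLoopA none false rest := by
        simp [faaLoopA, h']
      rw [step, ih]
      cases hfi : rest.findIdx? faaTrig with
      | none => simp
      | some i => simp [List.drop_succ_cons]

-- ===== VERDICT (by name: the statement is the Claim_ definition above) =====
theorem find_author_attack_spec : Claim_equal_find_author_attack := by
  intro tags _
  unfold Spec_find_author_attack
  exact faa_main tags
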